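-- pv_equiv track=rewrite | github.com/mariopzt/xiaozhi-esp32 | backend/app/services/memory.py | _format_profile_updates
-- ===== SOURCE A (Python) =====
-- from typing import Any
--
-- def _format_profile_updates(updates: dict[str, Any]) -> list[str]:
--     items: list[str] = []
--     if "name" in updates:
--         items.append(f"The user's name is {updates['name']}.")
--     if "age" in updates:
--         items.append(f"The user is {updates['age']} years old.")
--     if "city" in updates:
--         items.append(f"The user lives in or is from {updates['city']}.")
--     if "work" in updates:
--         items.append(f"The user's work is {updates['work']}.")
--     if "relationship_tone" in updates:
--         items.append(f"The preferred relationship tone is {updates['relationship_tone']}.")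
--     if "assistant_style" in updates:
--         items.append(f"The preferred assistant style is {updates['assistant_style']}.")
--     relation_labels = {
--         "partner_name": "The user's partner is",
--         "mother_name": "The user's mother is",
--         "father_name": "The user's father is",
--         "sister_name": "The user's sister is",
--         "brother_name": "The user's brother is",
--         "daughter_name": "The user's daughter is",
--         "son_name": "The user's son is",
--         "dog_name": "The user's dog is",
--         "cat_name": "The user's cat is",
--     }
--     for key, label in relation_labels.items():
--         if key in updates:
--             items.append(f"{label} {updates[key]}.")
--     return items
-- ===== SOURCE B (Python) =====
-- from typing import Any
--
-- # Reverse lookup table: key -> (output rank, prefix, suffix).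
-- _TBL = {
--     "name": (0, "The user's name is ", "."),
--     "age": (1, "The user is ", " years old."),
--     "city": (2, "The user lives in or is from ", "."),
--     "work": (3, "The user's work is ", "."),
--     "relationship_tone": (4, "The preferred relationship tone is ", "."),
--     "assistant_style": (5, "The preferred assistant style is ", "."),
--     "partner_name": (6, "The user's partner is ", "."),
--     "mother_name": (7, "The user's mother is ", "."),
--     "father_name": (8, "The user's father is ", "."),
--     "sister_name": (9, "The user's sister is ", "."),
--     "brother_name": (10, "The user's brother is ", "."),
--     "daughter_name": (11, "The user's daughter is ", "."),
--     "son_name": (12, "The user's son is ", "."),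
--     "dog_name": (13, "The user's dog is ", "."),
--     "cat_name": (14, "The user's cat is ", "."),
-- }
--
--
-- def _format_profile_updates(updates: dict[str, Any]) -> list[str]:
--     # One pass over the dict itself: tag each recognised key's sentence with
--     # its rank, then sort by rank to restore the fixed output order.
--     tagged = []
--     for key, value in updates.items():
--         hit = _TBL.get(key)
--         if hit is not None:
--             rank, pre, suf = hit
--             tagged.append((rank, f"{pre}{value}{suf}"))
--     tagged.sort(key=lambda t: t[0])
--     return [s for _, s in tagged]
-- ===== Notes on version B (the rewrite author's own statement) =====
-- stated objective: alternative
-- what changed: A scans a fixed sequence of 15 known keys testing membership in the dict; B instead makes one pass over the dict itself, tagging each recognised key's sentence with a rank from a reverse lookup table, and then sorts the tagged sentences by rank to restore the fixed output order.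
import Mathlib
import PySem

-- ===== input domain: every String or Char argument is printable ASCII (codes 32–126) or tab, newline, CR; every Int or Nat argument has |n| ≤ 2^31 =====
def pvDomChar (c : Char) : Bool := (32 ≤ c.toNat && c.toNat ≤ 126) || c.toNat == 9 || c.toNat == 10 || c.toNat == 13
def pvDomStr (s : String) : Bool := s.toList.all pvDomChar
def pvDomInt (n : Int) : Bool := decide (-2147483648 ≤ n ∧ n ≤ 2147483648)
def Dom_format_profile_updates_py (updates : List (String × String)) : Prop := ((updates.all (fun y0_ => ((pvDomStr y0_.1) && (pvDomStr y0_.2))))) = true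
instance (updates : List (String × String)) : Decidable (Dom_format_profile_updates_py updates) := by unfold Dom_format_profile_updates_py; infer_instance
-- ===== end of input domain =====

-- B traverses the input dict once, tagging each recognised key's sentence with its rank from a reverse lookup table, then sorts by rank — a different traversal (input-driven + sort) from A's scan over the fixed key sequence (objective: alternative, same cost).


-- ===== PORT A =====
def format_profile_updates_py (updates : List (String × String)) : List String :=
  let d := PySem.Dict.mk updates
  let items : List String := []
  let items := if d.contains "name" then items ++ ["The user's name is " ++ d.getD "name" "" ++ "."] else items
  let items := if d.contains "age" then items ++ ["The user is " ++ d.getD "age" "" ++ " years old."] else items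
  let items := if d.contains "city" then items ++ ["The user lives in or is from " ++ d.getD "city" "" ++ "."] else items
  let items := if d.contains "work" then items ++ ["The user's work is " ++ d.getD "work" "" ++ "."] else items
  let items := if d.contains "relationship_tone" then items ++ ["The preferred relationship tone is " ++ d.getD "relationship_tone" "" ++ "."] else items
  let items := if d.contains "assistant_style" then items ++ ["The preferred assistant style is " ++ d.getD "assistant_style" "" ++ "."] else items
  let relation_labels : PySem.Dict String String := PySem.Dict.mk
    [("partner_name", "The user's partner is"),
     ("mother_name", "The user's mother is"),
     ("father_name", "The user's father is"),
     ("sister_name", "The user's sister is"),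
     ("brother_name", "The user's brother is"),
     ("daughter_name", "The user's daughter is"),
     ("son_name", "The user's son is"),
     ("dog_name", "The user's dog is"),
     ("cat_name", "The user's cat is")]
  relation_labels.items.foldl
    (fun items kl => if d.contains kl.1 then items ++ [kl.2 ++ " " ++ d.getD kl.1 "" ++ "."] else items)
    items

-- ===== PORT B =====
-- Source B's reverse lookup table _TBL: key ↦ (rank, prefix, suffix)
def pvTbl : List (String × Int × String × String) :=
  [("name", (0, "The user's name is ", ".")),
   ("age", (1, "The user is ", " years old.")),
   ("city", (2, "The user lives in or is from ", ".")),
   ("work", (3, "The user's work is ", ".")),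
   ("relationship_tone", (4, "The preferred relationship tone is ", ".")),
   ("assistant_style", (5, "The preferred assistant style is ", ".")),
   ("partner_name", (6, "The user's partner is ", ".")),
   ("mother_name", (7, "The user's mother is ", ".")),
   ("father_name", (8, "The user's father is ", ".")),
   ("sister_name", (9, "The user's sister is ", ".")),
   ("brother_name", (10, "The user's brother is ", ".")),
   ("daughter_name", (11, "The user's daughter is ", ".")),
   ("son_name", (12, "The user's son is ", ".")),
   ("dog_name", (13, "The user's dog is ", ".")),
   ("cat_name", (14, "The user's cat is ", "."))]

def format_profile_updates_py_alt (updates : List (String × String)) : List String :=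
  let tagged : List (Int × String) := updates.foldl
    (fun acc kv =>
      match (PySem.Dict.mk pvTbl).get? kv.1 with
      | some (rank, pre, suf) => acc ++ [(rank, pre ++ kv.2 ++ suf)]
      | none => acc) []
  (PySem.List.sorted tagged (fun t => t.1) false).map (fun t => t.2)

-- ===== PRECONDITION & SPEC =====
-- Pre_ excludes association lists with duplicate keys: they do not encode any Python dict
-- (the Python argument is a dict, whose keys are necessarily distinct), so no Python-level
-- input is excluded.
def Pre_format_profile_updates_py (updates : List (String × String)) : Prop :=
  (updates.map Prod.fst).Nodup
instance (updates : List (String × String)) : Decidable (Pre_format_profile_updates_py updates) := by unfold Pre_format_profile_updates_py; infer_instance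
def pvWitness_format_profile_updates_py : (List (String × String)) := [("name", "Ada"), ("cat_name", "Tom")]

def Spec_format_profile_updates_py (updates : List (String × String)) (out : List String) : Prop := out = format_profile_updates_py_alt updates
instance (updates : List (String × String)) (out : List String) : Decidable (Spec_format_profile_updates_py updates out) := by unfold Spec_format_profile_updates_py; infer_instance

-- ===== CLAIM (what is proved, stated in full; the proofs are below) =====
def Claim_equal_format_profile_updates_py : Prop := ∀ (updates : List (String × String)), Dom_format_profile_updates_py updates → Pre_format_profile_updates_py updates → Spec_format_profile_updates_py updates (format_profile_updates_py updates)

-- ===== LEMMAS AND PROOFS =====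

-- the per-template chunk of A's output, driven by the dict of updates
def pvF (d : PySem.Dict String String) (t : String × Int × String × String) : Option (Int × String) :=
  if d.contains t.1 then some (t.2.1, t.2.2.1 ++ d.getD t.1 "" ++ t.2.2.2) else none

-- the per-update chunk of B's tagging pass
def pvG (kv : String × String) : Option (Int × String) :=
  match (PySem.Dict.mk pvTbl).get? kv.1 with
  | some (rank, pre, suf) => some (rank, pre ++ kv.2 ++ suf)
  | none => none

-- a conditional append is the append of a conditional singleton chunk
theorem pv_chunk (c : Bool) (x : List String) (s : String) :
    (if c then x ++ [s] else x) = x ++ (if c then [s] else []) := by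
  cases c <;> simp

-- one relation-label step of A's filter-map form, as a conditional singleton chunk
theorem pv_chunk2 (p : String × String → Bool) (f : String × String → String)
    (t : String × String) (ts : List (String × String)) :
    ((t :: ts).filter p).map f = (if p t then [f t] else []) ++ (ts.filter p).map f := by
  by_cases h : p t <;> simp [h]

-- one template step of (filterMap pvF).map snd, as a conditional singleton chunk
theorem pv_step (d : PySem.Dict String String) (t : String × Int × String × String)
    (ts : List (String × Int × String × String)) :
    (((t :: ts).filterMap (pvF d)).map Prod.snd) =
      (if d.contains t.1 then [t.2.2.1 ++ d.getD t.1 "" ++ t.2.2.2] else []) ++ ((ts.filterMap (pvF d)).map Prod.snd) := by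
  by_cases h : d.contains t.1 <;> simp [pvF, h]

-- A's output is the rank-ordered template pass, projected to sentences
theorem pvA_eq (updates : List (String × String)) :
    format_profile_updates_py updates = ((pvTbl.filterMap (pvF (PySem.Dict.mk updates))).map Prod.snd) := by
  unfold format_profile_updates_py
  rw [PySem.List.foldl_append_if]
  simp only [pvTbl, pv_step, List.filterMap_nil, List.map_nil, List.append_nil, pv_chunk, pv_chunk2, List.filter_nil]
  simp only [List.nil_append, List.append_assoc]
  rfl

-- B's tagging loop is the filterMap of pvG over the updates
theorem pvB_foldl (l : List (String × String)) (acc : List (Int × String)) :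
    l.foldl (fun acc kv =>
      match (PySem.Dict.mk pvTbl).get? kv.1 with
      | some (rank, pre, suf) => acc ++ [(rank, pre ++ kv.2 ++ suf)]
      | none => acc) acc = acc ++ l.filterMap pvG := by
  induction l generalizing acc with
  | nil => simp
  | cons kv l ih =>
    rw [List.foldl_cons]
    have hbeta : (match (PySem.Dict.mk pvTbl).get? kv.1 with
        | some (rank, pre, suf) => acc ++ [(rank, pre ++ kv.2 ++ suf)]
        | none => acc) = acc ++ (pvG kv).toList := by
      unfold pvG
      cases (PySem.Dict.mk pvTbl).get? kv.1 with
      | none => simp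
      | some t => obtain ⟨r, p, s⟩ := t; simp
    rw [hbeta, ih, List.filterMap_cons]
    cases h : pvG kv <;> simp [List.append_assoc]

-- a successful pvF step carries its template's rank
theorem pvF_rank (d : PySem.Dict String String) (t : String × Int × String × String)
    (x : Int × String) (h : pvF d t = some x) : x.1 = t.2.1 := by
  unfold pvF at h
  split at h
  · cases h; rfl
  · cases h

-- the template pass is strictly increasing in rank
theorem pv_pairwise (d : PySem.Dict String String) :
    (pvTbl.filterMap (pvF d)).Pairwise (fun a b => a.1 < b.1) := by
  rw [List.pairwise_filterMap]
  have hlit : pvTbl.Pairwise (fun a b => a.2.1 < b.2.1) := by decide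
  refine hlit.imp_of_mem ?_
  intro a b _ _ hab x hx y hy
  rw [pvF_rank d a x hx, pvF_rank d b y hy]
  exact hab

-- table lookups determine key, prefix and suffix from the rank
theorem pv_tbl_inj (k k' : String) (r : Int) (p s p' s' : String)
    (h : (PySem.Dict.mk pvTbl).get? k = some (r, p, s))
    (h' : (PySem.Dict.mk pvTbl).get? k' = some (r, p', s')) :
    k = k' ∧ p = p' ∧ s = s' := by
  have hm := PySem.Dict.mem_items_of_get?_eq_some _ h
  have hm' := PySem.Dict.mem_items_of_get?_eq_some _ h'
  have hfact : ∀ t ∈ pvTbl, ∀ t' ∈ pvTbl, t.2.1 = t'.2.1 → t = t' := by decide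
  have heq := hfact _ hm _ hm' rfl
  injection heq with h1 h2
  injection h2 with _ h3
  injection h3 with h4 h5
  exact ⟨h1, h4, h5⟩

-- middle-cancellation for string concatenation
theorem pv_str_cancel (p s v v' : String) (h : p ++ v ++ s = p ++ v' ++ s) : v = v' := by
  have := congrArg String.toList h
  simp only [String.toList_append, List.append_assoc] at this
  exact String.toList_inj.mp (List.append_cancel_right (List.append_cancel_left this))

-- the tagging pass has no duplicate entries (keys of a dict are distinct)
theorem pv_nodup_tagged (updates : List (String × String))
    (hnd : (updates.map Prod.fst).Nodup) : (updates.filterMap pvG).Nodup := by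
  refine List.Nodup.filterMap ?_ hnd.of_map
  intro a b c hca hcb
  unfold pvG at hca hcb
  rcases ha : (PySem.Dict.mk pvTbl).get? a.1 with _ | ⟨r, p, s⟩ <;> rw [ha] at hca <;>
    simp only [Option.mem_def, Option.some.injEq] at hca
  · cases hca
  rcases hb : (PySem.Dict.mk pvTbl).get? b.1 with _ | ⟨r', p', s'⟩ <;> rw [hb] at hcb <;>
    simp only [Option.mem_def, Option.some.injEq] at hcb
  · cases hcb
  have hr : r = r' := by
    have := hca.trans hcb.symm
    exact (Prod.mk.injEq _ _ _ _ ▸ this).1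
  subst hr
  obtain ⟨hk, hp, hs⟩ := pv_tbl_inj a.1 b.1 r p s p' s' ha hb
  have hv : p ++ a.2 ++ s = p ++ b.2 ++ s := by
    have := hca.trans hcb.symm
    have h2 := (Prod.mk.injEq _ _ _ _ ▸ this).2
    rw [h2, hp, hs]
  exact Prod.ext hk (pv_str_cancel p s a.2 b.2 hv)

-- membership: the template pass and the tagging pass collect the same entries
theorem pv_mem_iff (updates : List (String × String))
    (hnd : (updates.map Prod.fst).Nodup) (x : Int × String) :
    x ∈ pvTbl.filterMap (pvF (PySem.Dict.mk updates)) ↔ x ∈ updates.filterMap pvG := by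
  have hndd : (PySem.Dict.mk updates).keys.Nodup := hnd
  have hndt : (PySem.Dict.mk pvTbl).keys.Nodup := by decide
  simp only [List.mem_filterMap]
  constructor
  · rintro ⟨t, ht, hft⟩
    obtain ⟨tk, tr, tp, ts⟩ := t
    unfold pvF at hft
    split at hft
    case isTrue hc =>
      cases hft
      have hiso : ((PySem.Dict.mk updates).get? tk).isSome := by
        rw [← PySem.Dict.contains_eq_isSome_get?]; exact hc
      obtain ⟨v, hv⟩ := Option.isSome_iff_exists.mp hiso
      refine ⟨(tk, v), PySem.Dict.mem_items_of_get?_eq_some _ hv, ?_⟩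
      have htb : (PySem.Dict.mk pvTbl).get? tk = some (tr, tp, ts) :=
        PySem.Dict.get?_of_mem_items _ ht hndt
      have hgd : (PySem.Dict.mk updates).getD tk "" = v :=
        PySem.Dict.getD_of_get?_eq_some _ _ hv
      unfold pvG
      simp only [htb, hgd]
    case isFalse => cases hft
  · rintro ⟨kv, hkv, hg⟩
    obtain ⟨k, v⟩ := kv
    unfold pvG at hg
    rcases hb : (PySem.Dict.mk pvTbl).get? (k, v).1 with _ | ⟨r, p, s⟩ <;> rw [hb] at hg
    · cases hg
    cases hg
    have hmem : (k, (r, p, s)) ∈ pvTbl := PySem.Dict.mem_items_of_get?_eq_some _ hb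
    refine ⟨(k, (r, p, s)), hmem, ?_⟩
    have hget : (PySem.Dict.mk updates).get? k = some v :=
      PySem.Dict.get?_of_mem_items _ hkv hndd
    have hc : (PySem.Dict.mk updates).contains k = true := by
      rw [PySem.Dict.contains_eq_isSome_get?, hget]; rfl
    have hgd : (PySem.Dict.mk updates).getD k "" = v :=
      PySem.Dict.getD_of_get?_eq_some _ _ hget
    unfold pvF
    simp only [hc, if_pos, hgd]

-- ===== VERDICT (by name: the statement is the Claim_ definition above) =====
theorem format_profile_updates_py_spec : Claim_equal_format_profile_updates_py := by
  intro updates _ hnd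
  unfold Spec_format_profile_updates_py
  rw [pvA_eq]
  have hpw := pv_pairwise (PySem.Dict.mk updates)
  have hys : (pvTbl.filterMap (pvF (PySem.Dict.mk updates))).Nodup :=
    hpw.imp (fun hab heq => by cases heq; exact lt_irrefl _ hab)
  have hperm : (pvTbl.filterMap (pvF (PySem.Dict.mk updates))).Perm (updates.filterMap pvG) :=
    (List.perm_ext_iff_of_nodup hys (pv_nodup_tagged updates hnd)).2 (pv_mem_iff updates hnd)
  simp only [format_profile_updates_py_alt]
  rw [pvB_foldl, List.nil_append,
    PySem.List.sorted_eq_of_perm_of_pairwise_lt _ _ _ hperm hpw]
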